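-- pv_equiv track=rewrite | github.com/sunshine23lin/RagTest | chunker.py | _split_text_with_tables
-- ===== SOURCE A (Python) =====
-- def _split_text_with_tables(text):
--     """将包含表格的文本分割为表格和非表格部分"""
--     lines = text.split('\n')
--     parts = []
--     current_part = []
--     in_table = False
--
--     for line in lines:
--         is_table_line = '|' in line and ('---' in line or (current_part and '|' in current_part[-1]))
--
--         if is_table_line:
--             if not in_table and current_part:
--                 parts.append('\n'.join(current_part))
--                 current_part = []
--             in_table = True
--             current_part.append(line)
--         else:
--             if in_table and current_part:
--                 parts.append('\n'.join(current_part))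
--                 current_part = []
--             in_table = False
--             current_part.append(line)
--
--     if current_part:
--         parts.append('\n'.join(current_part))
--
--     return parts
-- ===== SOURCE B (Python) =====
-- def _split_text_with_tables(text):
--     lines = text.split('\n')
--     prevs = [''] + lines[:-1]
--     out = []          # parts collected last-to-first
--     last_flag = None  # table flag of the line just below the current one
--     for cur, prev in zip(reversed(lines), reversed(prevs)):
--         f = '|' in cur and ('---' in cur or '|' in prev)
--         if last_flag == f:
--             out[-1] = cur + '\n' + out[-1]
--         else:
--             out.append(cur)
--         last_flag = f
--     out.reverse()
--     return out
-- ===== Notes on version B (the rewrite author's own statement) =====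
-- stated objective: alternative
-- what changed: A's forward flush-on-state-change state machine (parts/current_part/in_table) is replaced by a single backward pass that builds the output back-to-front: walking the lines right-to-left, each line either opens a new part or is prepended into the part below it when its table flag matches the remembered flag of the line below.
import Mathlib
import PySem

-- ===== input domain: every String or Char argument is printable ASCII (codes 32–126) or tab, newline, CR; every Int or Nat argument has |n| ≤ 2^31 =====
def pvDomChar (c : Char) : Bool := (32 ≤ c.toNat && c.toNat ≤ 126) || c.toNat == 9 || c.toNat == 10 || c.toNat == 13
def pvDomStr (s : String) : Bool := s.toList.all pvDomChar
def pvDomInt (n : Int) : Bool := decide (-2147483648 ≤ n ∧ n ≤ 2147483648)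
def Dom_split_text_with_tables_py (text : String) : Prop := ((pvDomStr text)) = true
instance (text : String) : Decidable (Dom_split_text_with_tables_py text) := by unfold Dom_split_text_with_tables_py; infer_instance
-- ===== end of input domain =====

-- B replaces A's forward flush-on-state-change state machine by a single backward pass that
-- builds the output back-to-front ("alternative": same O(n) cost, not claimed faster).

-- ===== PORT A =====
-- '|' in s  /  '---' in s
def pvBar (s : String) : Bool := PySem.Str.isIn "|" s
def pvDash (s : String) : Bool := PySem.Str.isIn "---" s

-- text.split('\n'): sep "\n" ≠ "", so split? is always `some`
def pvLines (text : String) : List String := (PySem.Str.split? text "\n").getD []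

-- A's loop over lines with state (parts, current_part, in_table), plus the final flush
def pvALoop : List String → List String → List String → Bool → List String
  | [], parts, cur, _ =>
      if !cur.isEmpty then parts ++ [PySem.Str.join "\n" cur] else parts
  | l :: rest, parts, cur, inTable =>
      let isTab := pvBar l && (pvDash l || (!cur.isEmpty && pvBar (cur.getLast?.getD "")))
      if isTab then
        if !inTable && !cur.isEmpty then
          pvALoop rest (parts ++ [PySem.Str.join "\n" cur]) [l] true
        else
          pvALoop rest parts (cur ++ [l]) true
      else
        if inTable && !cur.isEmpty then
          pvALoop rest (parts ++ [PySem.Str.join "\n" cur]) [l] false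
        else
          pvALoop rest parts (cur ++ [l]) false

def split_text_with_tables_py (text : String) : List String :=
  pvALoop (pvLines text) [] [] false

-- ===== PORT B =====
-- one backward step: state (out, last_flag); merge cur into the part below it (out[-1])
-- when the table flag matches the remembered flag of the line below, else open a new part
def pvBStep (st : List String × Option Bool) (p : String × String) : List String × Option Bool :=
  let f := pvBar p.1 && (pvDash p.1 || pvBar p.2)
  if st.2 == some f then
    (st.1.dropLast ++ [p.1 ++ "\n" ++ (st.1.getLast?.getD "")], some f)
  else
    (st.1 ++ [p.1], some f)

def split_text_with_tables_py_alt (text : String) : List String :=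
  let lines := pvLines text
  let prevs := "" :: lines.dropLast          -- [''] + lines[:-1]
  (((lines.reverse).zip (prevs.reverse)).foldl pvBStep ([], none)).1.reverse

-- ===== PRECONDITION & SPEC =====
def Spec_split_text_with_tables_py (text : String) (out : List String) : Prop := out = split_text_with_tables_py_alt text
instance (text : String) (out : List String) : Decidable (Spec_split_text_with_tables_py text out) := by unfold Spec_split_text_with_tables_py; infer_instance

-- ===== CLAIM (what is proved, stated in full; the proofs are below) =====
def Claim_equal_split_text_with_tables_py : Prop := ∀ (text : String), Dom_split_text_with_tables_py text → Spec_split_text_with_tables_py text (split_text_with_tables_py text)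

-- ===== LEMMAS AND PROOFS =====

-- reference recursion both ports are reduced to: split l :: rest into run-joined parts,
-- prev being the raw line before l
def pvBRec : String → List String → List String
  | _, [] => []
  | prev, l :: rest =>
      match rest with
      | [] => [l]
      | r :: _ =>
          if (pvBar r && (pvDash r || pvBar l)) == (pvBar l && (pvDash l || pvBar prev)) then
            match pvBRec l rest with
            | [] => [l]          -- unreachable: pvBRec of a nonempty list is nonempty
            | h :: t => (l ++ "\n" ++ h) :: t
          else l :: pvBRec l rest

-- the (line, raw previous line) pairs, front to back
def pvPairs : String → List String → List (String × String)
  | _, [] => []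
  | prev, l :: ls => (l, prev) :: pvPairs l ls

-- what A's loop appends after parts, given the pending run cur (last line prev) and flag
def pvMerge (s : String) (flag : Bool) (prev : String) : List String → List String
  | [] => [s]
  | l :: rest =>
      if (pvBar l && (pvDash l || pvBar prev)) == flag then
        match pvBRec prev (l :: rest) with
        | [] => [s]
        | h :: t => (s ++ "\n" ++ h) :: t
      else s :: pvBRec prev (l :: rest)

theorem pvBRec_cons_cons (prev l r : String) (rs : List String) :
    pvBRec prev (l :: r :: rs) =
      if (pvBar r && (pvDash r || pvBar l)) == (pvBar l && (pvDash l || pvBar prev)) then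
        match pvBRec l (r :: rs) with
        | [] => [l]
        | h :: t => (l ++ "\n" ++ h) :: t
      else l :: pvBRec l (r :: rs) := rfl

theorem pvBRec_ne_nil (prev l : String) (ls : List String) : pvBRec prev (l :: ls) ≠ [] := by
  cases ls with
  | nil => simp [pvBRec]
  | cons r rs =>
      rw [pvBRec_cons_cons]
      split
      · cases h : pvBRec l (r :: rs) <;> simp
      · simp

theorem pvCJoin_concat (sep y : List Char) :
    ∀ (xs : List (List Char)), xs ≠ [] →
      PySem.Chars.join sep (xs ++ [y]) = PySem.Chars.join sep xs ++ sep ++ y := by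
  intro xs
  induction xs with
  | nil => intro h; exact absurd rfl h
  | cons x xs ih =>
      intro _
      cases xs with
      | nil => simp [PySem.Chars.join_cons_cons, PySem.Chars.join_singleton]
      | cons x2 xs' =>
          have := ih (by simp)
          simp only [List.cons_append, PySem.Chars.join_cons_cons] at this ⊢
          rw [this]; simp [List.append_assoc]

theorem pvJoin_concat (cur : List String) (l : String) (h : cur ≠ []) :
    PySem.Str.join "\n" (cur ++ [l]) = PySem.Str.join "\n" cur ++ "\n" ++ l := by
  apply String.toList_inj.mp
  simp only [String.toList_append, PySem.Str.toList_join, List.map_append, List.map_cons,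
    List.map_nil]
  rw [pvCJoin_concat _ _ _ (by simpa using h)]

theorem pvJoin_singleton (l : String) : PySem.Str.join "\n" [l] = l := by
  apply String.toList_inj.mp
  simp [PySem.Str.toList_join, PySem.Chars.join_singleton]

theorem pvBRec_eq_merge (prev l : String) (rest : List String) :
    pvBRec prev (l :: rest) = pvMerge l (pvBar l && (pvDash l || pvBar prev)) l rest := by
  cases rest with
  | nil => rfl
  | cons r rs => rfl

-- one iteration of A's loop, with the flag expressed through the previous raw line
theorem pvALoop_step (l : String) (rest parts cur : List String) (flag : Bool) (prev : String)
    (hcur : cur.getLast? = some prev) :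
    pvALoop (l :: rest) parts cur flag =
      if (pvBar l && (pvDash l || pvBar prev)) = flag
      then pvALoop rest parts (cur ++ [l]) flag
      else pvALoop rest (parts ++ [PySem.Str.join "\n" cur]) [l]
             (pvBar l && (pvDash l || pvBar prev)) := by
  have hcne : cur ≠ [] := by intro h; simp [h] at hcur
  have hE : cur.isEmpty = false := by simp [hcne]
  have hgd : cur.getLast?.getD "" = prev := by rw [hcur]; rfl
  cases hb : (pvBar l && (pvDash l || pvBar prev)) <;> cases hflag : flag <;>
    simp [pvALoop, hgd, hE, hb]

-- extending the pending run with a same-flag line commutes with pvMerge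
theorem pvMerge_extend (cur : List String) (l prev : String) (flag : Bool) (hc : cur ≠ [])
    (hef : (pvBar l && (pvDash l || pvBar prev)) = flag) (rest : List String) :
    pvMerge (PySem.Str.join "\n" cur) flag prev (l :: rest)
      = pvMerge (PySem.Str.join "\n" (cur ++ [l])) flag l rest := by
  cases rest with
  | nil =>
      simp only [pvMerge, hef, beq_self_eq_true, if_true, pvBRec]
      rw [pvJoin_concat cur l hc]
  | cons r rs =>
      simp only [pvMerge, hef, beq_self_eq_true, if_true]
      rw [pvBRec_cons_cons, hef]
      rcases hne : pvBRec l (r :: rs) with _ | ⟨h, t⟩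
      · exact absurd hne (pvBRec_ne_nil l r rs)
      by_cases hg : (pvBar r && (pvDash r || pvBar l)) = flag
      · simp only [hg, beq_self_eq_true, if_true]
        rw [pvJoin_concat cur l hc]
        simp [String.append_assoc]
      · have : ((pvBar r && (pvDash r || pvBar l)) == flag) = false := by
          simp [hg]
        simp only [this, Bool.false_eq_true, if_false]
        rw [pvJoin_concat cur l hc]

-- a flag change flushes the pending run and restarts pvMerge at l
theorem pvMerge_flush (cur : List String) (l prev : String) (flag : Bool)
    (hef : (pvBar l && (pvDash l || pvBar prev)) ≠ flag) (rest : List String) :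
    pvMerge (PySem.Str.join "\n" cur) flag prev (l :: rest)
      = PySem.Str.join "\n" cur :: pvMerge l (pvBar l && (pvDash l || pvBar prev)) l rest := by
  have hb : ((pvBar l && (pvDash l || pvBar prev)) == flag) = false := by
    simp [hef]
  rw [show pvMerge (PySem.Str.join "\n" cur) flag prev (l :: rest)
      = if ((pvBar l && (pvDash l || pvBar prev)) == flag) then
          (match pvBRec prev (l :: rest) with
           | [] => [PySem.Str.join "\n" cur]
           | h :: t => (PySem.Str.join "\n" cur ++ "\n" ++ h) :: t)
        else PySem.Str.join "\n" cur :: pvBRec prev (l :: rest) from rfl,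
    hb]
  simp only [Bool.false_eq_true, if_false]
  rw [pvBRec_eq_merge]

-- A's loop = the flushed parts so far, plus pvMerge of the pending run into pvBRec
theorem pvA_loop (ls : List String) :
    ∀ (parts cur : List String) (flag : Bool) (prev : String),
      cur.getLast? = some prev →
      pvALoop ls parts cur flag
        = parts ++ pvMerge (PySem.Str.join "\n" cur) flag prev ls := by
  induction ls with
  | nil =>
      intro parts cur flag prev hcur
      have hcne : cur ≠ [] := by intro h; simp [h] at hcur
      have hE : cur.isEmpty = false := by simp [hcne]
      simp [pvALoop, hE, pvMerge]
  | cons l rest ih =>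
      intro parts cur flag prev hcur
      have hcne : cur ≠ [] := by intro h; simp [h] at hcur
      rw [pvALoop_step l rest parts cur flag prev hcur]
      by_cases hef : (pvBar l && (pvDash l || pvBar prev)) = flag
      · rw [if_pos hef, ih parts (cur ++ [l]) flag l (by simp),
          pvMerge_extend cur l prev flag hcne hef rest]
      · rw [if_neg hef, ih (parts ++ [PySem.Str.join "\n" cur]) [l]
            (pvBar l && (pvDash l || pvBar prev)) l (by simp),
          pvMerge_flush cur l prev flag hef rest, pvJoin_singleton]
        simp

-- B's backward fold = pvBRec reversed, with the head line's flag remembered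
theorem pvB_fold (ls : List String) :
    ∀ (l prev : String),
      List.foldl pvBStep ([], none) ((pvPairs prev (l :: ls)).reverse)
        = ((pvBRec prev (l :: ls)).reverse, some (pvBar l && (pvDash l || pvBar prev))) := by
  induction ls with
  | nil =>
      intro l prev
      simp [pvPairs, pvBStep, pvBRec]
  | cons r rs ih =>
      intro l prev
      rw [show pvPairs prev (l :: r :: rs) = (l, prev) :: pvPairs l (r :: rs) from rfl,
        List.reverse_cons, List.foldl_append, ih r l, List.foldl_cons, List.foldl_nil]
      rcases hne : pvBRec l (r :: rs) with _ | ⟨h, t⟩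
      · exact absurd hne (pvBRec_ne_nil l r rs)
      rw [pvBRec_cons_cons]
      by_cases hg : (pvBar r && (pvDash r || pvBar l)) = (pvBar l && (pvDash l || pvBar prev))
      · have hb : (some (pvBar r && (pvDash r || pvBar l))
            == some (pvBar l && (pvDash l || pvBar prev))) = true := by simp [hg]
        simp only [pvBStep, if_true, hg, beq_self_eq_true, List.reverse_cons]
        simp [hne]
      · have hb : (some (pvBar r && (pvDash r || pvBar l))
            == some (pvBar l && (pvDash l || pvBar prev))) = false := by simp [hg]
        have hb2 : ((pvBar r && (pvDash r || pvBar l))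
            == (pvBar l && (pvDash l || pvBar prev))) = false := by simp [hg]
        simp only [pvBStep, hb, Bool.false_eq_true, if_false, hb2, List.reverse_cons]
        simp [hne]

theorem pvPairs_zip (ls : List String) :
    ∀ (prev : String), ls.zip (prev :: ls.dropLast) = pvPairs prev ls := by
  induction ls with
  | nil => intro prev; rfl
  | cons l ls ih =>
      intro prev
      cases ls with
      | nil => rfl
      | cons x xs =>
          rw [show (l :: x :: xs).dropLast = l :: (x :: xs).dropLast from rfl,
            List.zip_cons_cons, ih l]
          rfl

theorem pvZip_reverse {α β : Type} (as : List α) :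
    ∀ (bs : List β), as.length = bs.length →
      (as.reverse).zip (bs.reverse) = (as.zip bs).reverse := by
  induction as with
  | nil => intro bs h; simp
  | cons a as ih =>
      intro bs h
      cases bs with
      | nil => simp at h
      | cons b bs =>
          have hl : as.length = bs.length := by simpa using h
          simp only [List.reverse_cons, List.zip_cons_cons]
          rw [List.zip_append (by simp [hl]), ih bs hl]
          simp

-- ===== VERDICT (by name: the statement is the Claim_ definition above) =====
theorem split_text_with_tables_py_spec : Claim_equal_split_text_with_tables_py := by
  intro text _
  show pvALoop (pvLines text) [] [] false
      = ((((pvLines text).reverse).zip (("" :: (pvLines text).dropLast).reverse)).foldl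
          pvBStep ([], none)).1.reverse
  cases hl : pvLines text with
  | nil => rfl
  | cons l ls =>
      have hlen : (l :: ls).length = ("" :: (l :: ls).dropLast).length := by
        simp
      rw [pvZip_reverse _ _ hlen, pvPairs_zip (l :: ls) "", pvB_fold ls l ""]
      have hstep : pvALoop (l :: ls) [] [] false
          = pvALoop ls [] [l] (pvBar l && (pvDash l || pvBar "")) := by
        have hbar0 : pvBar "" = false := by decide
        cases hb : pvBar l <;> cases hd : pvDash l <;>
          simp [pvALoop, hb, hd, hbar0]
      rw [hstep, pvA_loop ls [] [l] (pvBar l && (pvDash l || pvBar "")) l (by simp),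
        pvJoin_singleton, ← pvBRec_eq_merge "" l ls]
      simp
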